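-- pv_equiv track=rewrite | github.com/goldenapple1/labeling | data_wash/words.py | unexpected_chars
-- ===== SOURCE A (Python) =====
-- import string
--
-- def unexpected_chars(word: str) -> bool:
--     if word[0] in ".\"'-":
--         return True
--
--     for i in word:
--         if i not in string.ascii_letters and i not in "-":
--             return True
--
--     for n in word[1:]:
--         if n in string.ascii_uppercase:
--             return True
--
--     return False
-- ===== SOURCE B (Python) =====
-- # Same validation in one pass: accept iff the word starts with an ASCII letter
-- # and continues with lowercase letters or hyphens; no per-class rescans of the word.
-- def unexpected_chars(word: str) -> bool:
--     if not word or not ('A' <= word[0] <= 'Z' or 'a' <= word[0] <= 'z'):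
--         return True
--     return any(not ('a' <= c <= 'z' or c == '-') for c in word[1:])
-- ===== Notes on version B (the rewrite author's own statement) =====
-- stated objective: simpler
-- what changed: Replaces A's three sequential character scans (punctuation head check, full-word letter/hyphen scan, tail uppercase scan) with a single characterisation: first char is an ASCII letter and every later char is lowercase or a hyphen, checked in one pass over the tail.
import Mathlib
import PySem

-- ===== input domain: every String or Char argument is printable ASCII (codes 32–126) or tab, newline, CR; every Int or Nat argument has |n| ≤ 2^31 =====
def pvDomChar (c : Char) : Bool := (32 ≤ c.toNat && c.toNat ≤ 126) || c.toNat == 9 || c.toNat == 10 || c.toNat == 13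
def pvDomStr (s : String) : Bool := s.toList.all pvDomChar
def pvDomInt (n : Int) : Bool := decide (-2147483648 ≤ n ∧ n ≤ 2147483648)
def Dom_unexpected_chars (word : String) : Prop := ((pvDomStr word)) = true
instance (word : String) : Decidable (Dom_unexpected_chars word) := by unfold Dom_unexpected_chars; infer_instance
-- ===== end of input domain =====

-- B replaces A's three sequential character scans with a single one-pass check
-- (first char an ASCII letter, tail all lowercase-or-hyphen); same values, simpler.


-- ===== PORT A =====
-- string.ascii_letters and string.ascii_uppercase, as the character lists the
-- Python membership tests `i in string.ascii_letters` etc. range over.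
def pyAsciiLetters : List Char := ['a', 'b', 'c', 'd', 'e', 'f', 'g', 'h', 'i', 'j', 'k', 'l', 'm', 'n', 'o', 'p', 'q', 'r', 's', 't', 'u', 'v', 'w', 'x', 'y', 'z', 'A', 'B', 'C', 'D', 'E', 'F', 'G', 'H', 'I', 'J', 'K', 'L', 'M', 'N', 'O', 'P', 'Q', 'R', 'S', 'T', 'U', 'V', 'W', 'X', 'Y', 'Z']
def pyAsciiUpper : List Char := ['A', 'B', 'C', 'D', 'E', 'F', 'G', 'H', 'I', 'J', 'K', 'L', 'M', 'N', 'O', 'P', 'Q', 'R', 'S', 'T', 'U', 'V', 'W', 'X', 'Y', 'Z']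

def unexpected_chars (word : String) : Bool :=
  match PySem.Str.pyGet? word 0 with
  | none => false   -- word[0] raises IndexError on ""; excluded by Pre_unexpected_chars
  | some c0 =>
    if ['.', '"', '\'', '-'].contains c0 then true
    else if word.toList.any (fun i => !(pyAsciiLetters.contains i) && !(['-'].contains i)) then true
    else if (PySem.List.slice word.toList (some 1) none).any (fun n => pyAsciiUpper.contains n) then true
    else false

-- ===== PORT B =====
def unexpected_chars_alt (word : String) : Bool :=
  match word.toList with
  | [] => true
  | c :: rest =>
    if !(('A' ≤ c && c ≤ 'Z') || ('a' ≤ c && c ≤ 'z')) then true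
    else rest.any (fun ch => !(('a' ≤ ch && ch ≤ 'z') || ch == '-'))

-- ===== PRECONDITION & SPEC =====
-- Pre_ excludes only the empty string, on which A raises IndexError at word[0].
def Pre_unexpected_chars (word : String) : Prop := word ≠ ""
instance (word : String) : Decidable (Pre_unexpected_chars word) := by unfold Pre_unexpected_chars; infer_instance
def pvWitness_unexpected_chars : String := "Beta-test"

def Spec_unexpected_chars (word : String) (out : Bool) : Prop := out = unexpected_chars_alt word
instance (word : String) (out : Bool) : Decidable (Spec_unexpected_chars word out) := by unfold Spec_unexpected_chars; infer_instance

-- ===== CLAIM (what is proved, stated in full; the proofs are below) =====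
def Claim_equal_unexpected_chars : Prop := ∀ (word : String), Dom_unexpected_chars word → Pre_unexpected_chars word → Spec_unexpected_chars word (unexpected_chars word)

-- ===== LEMMAS AND PROOFS =====

theorem char_eq_iff (c d : Char) : (c == d) = (c.toNat == d.toNat) := by
  rcases c with ⟨⟨⟨a, ha⟩⟩, hc⟩; rcases d with ⟨⟨⟨b, hb⟩⟩, hd⟩
  simp [Char.toNat, UInt32.toNat, Char.ext_iff, UInt32.ext_iff]

theorem char_le_iff (c d : Char) : (c ≤ d) = (c.toNat ≤ d.toNat) := by
  rcases c with ⟨⟨⟨a, ha⟩⟩, hc⟩; rcases d with ⟨⟨⟨b, hb⟩⟩, hd⟩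
  simp [Char.toNat, UInt32.toNat, Char.le_def, UInt32.le_iff_toNat_le]

-- A's first two checks on the FIRST character together say exactly "not an ASCII letter".
set_option maxRecDepth 100000 in
theorem head_fact (c : Char) :
    (['.', '"', '\'', '-'].contains c || (!(pyAsciiLetters.contains c) && !(['-'].contains c)))
      = (!(('A' ≤ c && c ≤ 'Z') || ('a' ≤ c && c ≤ 'z'))) := by
  simp only [pyAsciiLetters, List.contains_cons, List.contains_nil, char_eq_iff, char_le_iff]
  rw [Bool.eq_iff_iff]
  simp only [Bool.or_eq_true, Bool.and_eq_true, Bool.not_eq_true', Bool.or_eq_false_iff,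
    beq_iff_eq, beq_eq_false_iff_ne, ne_eq, decide_eq_true_eq, decide_eq_false_iff_not,
    Char.reduceToNat, Bool.false_eq_true, or_false, Bool.and_eq_false_iff, decide_eq_false_iff_not, and_true, not_le, not_lt]
  omega

-- A's last two checks on a TAIL character together say exactly "not lowercase-or-hyphen".
set_option maxRecDepth 100000 in
theorem tail_fact (c : Char) :
    ((!(pyAsciiLetters.contains c) && !(['-'].contains c)) || pyAsciiUpper.contains c)
      = (!(('a' ≤ c && c ≤ 'z') || (c == '-'))) := by
  simp only [pyAsciiLetters, pyAsciiUpper, List.contains_cons, List.contains_nil, char_eq_iff, char_le_iff]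
  rw [Bool.eq_iff_iff]
  simp only [Bool.or_eq_true, Bool.and_eq_true, Bool.not_eq_true', Bool.or_eq_false_iff,
    beq_iff_eq, beq_eq_false_iff_ne, ne_eq, decide_eq_true_eq, decide_eq_false_iff_not,
    Char.reduceToNat, Bool.false_eq_true, or_false, Bool.and_eq_false_iff, decide_eq_false_iff_not, and_true, not_le, not_lt]
  omega

theorem any_or_split (p q : Char → Bool) (l : List Char) :
    (l.any p || l.any q) = l.any (fun x => p x || q x) := by
  induction l with
  | nil => rfl
  | cons x xs ih =>
    simp only [List.any_cons, ← ih]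
    cases p x <;> cases q x <;> cases xs.any p <;> cases xs.any q <;> rfl

-- ===== VERDICT (by name: the statement is the Claim_ definition above) =====
theorem unexpected_chars_spec : Claim_equal_unexpected_chars := by
  intro word _ hpre
  unfold Spec_unexpected_chars unexpected_chars unexpected_chars_alt
  have hne : word.toList ≠ [] := by
    intro h
    exact hpre (String.toList_eq_nil_iff.mp h)
  obtain ⟨c, rest, hcr⟩ := List.exists_cons_of_ne_nil hne
  rw [hcr]
  have hget : PySem.Str.pyGet? word 0 = some c := by
    simp [PySem.Str.pyGet?, PySem.List.pyGet?, PySem.List.pyIdx?, hcr]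
  rw [hget]
  have hslice : PySem.List.slice (c :: rest) (some 1) none = rest := by
    rw [PySem.List.slice_from _ (by norm_num)]
    rfl
  rw [hslice, List.any_cons]
  simp only [Bool.if_true_left, Bool.if_false_right, Bool.and_true, Bool.decide_eq_true]
  rw [← head_fact c]
  have hB : (rest.any fun ch => !(('a' ≤ ch && ch ≤ 'z') || (ch == '-')))
      = ((rest.any fun i => !(pyAsciiLetters.contains i) && !(['-'].contains i))
          || rest.any fun n => pyAsciiUpper.contains n) := by
    rw [any_or_split]
    congr 1
    funext a
    exact (tail_fact a).symm
  rw [hB]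
  simp [Bool.or_assoc, Bool.or_comm]
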